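-- pv_equiv track=rewrite | github.com/uuverifiers/ostrich | zaligvinder/SolverBinaries/z3alpha/z3alpha.py | rewrite_smt2_with_strat
-- ===== SOURCE A (Python) =====
-- def rewrite_smt2_with_strat(smt2_str, strat):
--     new_smt2_str = ""
--     for line in smt2_str.split('\n'):
--         if "check-sat" in line:
--             new_smt2_str += f"(check-sat-using {strat})\n"
--         else:
--             new_smt2_str += line + "\n"
--     return new_smt2_str
-- ===== SOURCE B (Python) =====
-- def rewrite_smt2_with_strat(smt2_str, strat):
--     # single pass over the characters: stream lines through a buffer instead of split-then-concatenate
--     repl = f"(check-sat-using {strat})"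
--     out = []
--     buf = []
--     for ch in smt2_str:
--         if ch == '\n':
--             line = ''.join(buf)
--             out.append(repl if 'check-sat' in line else line)
--             out.append('\n')
--             buf = []
--         else:
--             buf.append(ch)
--     line = ''.join(buf)
--     out.append(repl if 'check-sat' in line else line)
--     out.append('\n')
--     return ''.join(out)
-- ===== Notes on version B (the rewrite author's own statement) =====
-- stated objective: alternative
-- what changed: Replaces split('\n') followed by a line loop with string concatenation by a single character-level pass that streams each line through a buffer and joins the collected pieces once at the end.
import Mathlib
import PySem

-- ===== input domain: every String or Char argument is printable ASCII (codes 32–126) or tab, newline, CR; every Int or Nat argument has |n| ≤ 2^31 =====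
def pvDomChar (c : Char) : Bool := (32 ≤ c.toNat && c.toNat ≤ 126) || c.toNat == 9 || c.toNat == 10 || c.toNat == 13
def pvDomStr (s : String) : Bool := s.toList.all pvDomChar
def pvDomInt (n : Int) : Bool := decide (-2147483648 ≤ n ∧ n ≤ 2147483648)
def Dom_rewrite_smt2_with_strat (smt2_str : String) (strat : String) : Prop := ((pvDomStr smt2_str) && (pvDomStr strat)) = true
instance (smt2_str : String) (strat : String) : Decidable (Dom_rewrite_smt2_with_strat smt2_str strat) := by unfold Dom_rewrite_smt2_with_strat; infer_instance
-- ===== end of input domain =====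

-- B replaces split('\n')-then-concatenate by a single character-level pass with a line buffer (alternative decomposition, same result).

-- ===== PORT A =====
-- literal port of A: for line in smt2_str.split('\n'): accumulate into new_smt2_str
def rewrite_smt2_with_strat (smt2_str : String) (strat : String) : String :=
  ((PySem.Str.split? smt2_str "\n").getD []).foldl
    (fun new_smt2_str line =>
      if PySem.Str.isIn "check-sat" line then
        new_smt2_str ++ ("(check-sat-using " ++ strat ++ ")\n")
      else
        new_smt2_str ++ (line ++ "\n")) ""

-- ===== PORT B =====
-- port of Source B: `repl if 'check-sat' in line else line` for a buffered line
def pvEmitLine (strat : String) (buf : List Char) : String :=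
  if PySem.Str.isIn "check-sat" (String.ofList buf) then "(check-sat-using " ++ strat ++ ")"
  else String.ofList buf

-- port of Source B: one fold over the characters, state = (out pieces, current line buffer); final ''.join(out)
def rewrite_smt2_with_strat_alt (smt2_str : String) (strat : String) : String :=
  let fin := smt2_str.toList.foldl
    (fun (st : List String × List Char) ch =>
      if ch = '\n' then (st.1 ++ [pvEmitLine strat st.2] ++ ["\n"], ([] : List Char))
      else (st.1, st.2 ++ [ch]))
    ([], [])
  PySem.Str.join "" (fin.1 ++ [pvEmitLine strat fin.2] ++ ["\n"])

-- ===== PRECONDITION & SPEC =====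
def Spec_rewrite_smt2_with_strat (smt2_str : String) (strat : String) (out : String) : Prop := out = rewrite_smt2_with_strat_alt smt2_str strat
instance (smt2_str : String) (strat : String) (out : String) : Decidable (Spec_rewrite_smt2_with_strat smt2_str strat out) := by unfold Spec_rewrite_smt2_with_strat; infer_instance

-- ===== CLAIM (what is proved, stated in full; the proofs are below) =====
def Claim_equal_rewrite_smt2_with_strat : Prop := ∀ (smt2_str : String) (strat : String), Dom_rewrite_smt2_with_strat smt2_str strat → Spec_rewrite_smt2_with_strat smt2_str strat (rewrite_smt2_with_strat smt2_str strat)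

-- ===== LEMMAS AND PROOFS =====

-- the lines of cs when split on '\n' (proof-side characterisation shared by both ports)
def pvLines : List Char → List (List Char)
  | [] => [[]]
  | c :: r => if c = '\n' then [] :: pvLines r else (pvLines r).modifyHead (c :: ·)

-- the common result: rewrite the buffered prefix `buf` plus the remaining characters
def pvFoldLines (strat : String) : List Char → List Char → String
  | buf, [] => pvEmitLine strat buf ++ "\n"
  | buf, c :: r =>
      if c = '\n' then pvEmitLine strat buf ++ "\n" ++ pvFoldLines strat [] r
      else pvFoldLines strat (buf ++ [c]) r

theorem pvLines_modifyHead_id (l : List (List Char)) :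
    l.modifyHead (fun x => x) = l := by
  cases l <;> simp

theorem pvLines_modifyHead_nil (l : List (List Char)) :
    l.modifyHead (fun x => ([] : List Char) ++ x) = l := by
  cases l <;> simp

theorem pv_go_eq (l : List Char) : ∀ (fuel : Nat), l.length ≤ fuel → ∀ (cur : List Char) (acc : List (List Char)),
    PySem.Chars.splitOn.go ['\n'] fuel l cur acc
      = acc.reverse ++ (pvLines l).modifyHead (fun x => cur.reverse ++ x) := by
  induction l with
  | nil =>
    intro fuel _ cur acc
    cases fuel <;> simp [PySem.Chars.splitOn.go, pvLines]
  | cons c r ih =>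
    intro fuel hfuel cur acc
    cases fuel with
    | zero => simp at hfuel
    | succ f =>
      simp only [PySem.Chars.splitOn.go]
      by_cases hc : c = '\n'
      · subst hc
        have hpre : List.isPrefixOf ['\n'] ('\n' :: r) = true := by simp [List.isPrefixOf]
        simp only [hpre, if_pos]
        rw [show List.drop ['\n'].length ('\n' :: r) = r from rfl]
        rw [ih f (by simp only [List.length_cons] at hfuel; omega) [] (cur.reverse :: acc)]
        simp [pvLines, pvLines_modifyHead_id]
      · have hpre : List.isPrefixOf ['\n'] (c :: r) = false := by
          simp [List.isPrefixOf]
          exact fun h => absurd h.symm hc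
        simp only [hpre, if_neg, Bool.false_eq_true, not_false_iff]
        rw [ih f (Nat.le_of_succ_le_succ (by simpa using hfuel))]
        simp only [pvLines, if_neg hc]
        cases h : pvLines r with
        | nil => simp
        | cons hd tl => simp [List.modifyHead]

theorem pv_splitOn_newline (cs : List Char) :
    PySem.Chars.splitOn cs ['\n'] = pvLines cs := by
  unfold PySem.Chars.splitOn
  rw [pv_go_eq cs (cs.length + 1) (Nat.le_succ _) [] []]
  simp [pvLines_modifyHead_id]

theorem pv_join_empty : ∀ (l : List String),
    PySem.Str.join "" l = String.ofList (l.map String.toList).flatten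
  | [] => by simp [PySem.Str.join, PySem.Chars.join, List.intercalate]
  | [x] => by simp [PySem.Str.join, PySem.Chars.join, List.intercalate]
  | x :: y :: t => by
      have ih := pv_join_empty (y :: t)
      simp only [PySem.Str.join, PySem.Chars.join, List.intercalate, String.toList_empty,
        List.map_cons, List.intersperse_cons₂, List.flatten_cons, List.nil_append] at ih ⊢
      rw [String.ofList_append, ih]
      simp [String.ofList_append]

theorem pv_stepA_eq (strat : String) (a : String) (l : List Char) :
    (if PySem.Str.isIn "check-sat" (String.ofList l) then a ++ ("(check-sat-using " ++ strat ++ ")\n")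
     else a ++ (String.ofList l ++ "\n"))
      = a ++ (pvEmitLine strat l ++ "\n") := by
  have h : (")\n" : String) = ")" ++ "\n" := by decide
  unfold pvEmitLine
  split_ifs with hin
  · rw [h]; simp [String.append_assoc]
  · rfl

theorem pv_foldA (strat : String) (cs : List Char) : ∀ (buf : List Char) (acc : String),
    ((pvLines cs).modifyHead (fun x => buf ++ x)).foldl
      (fun a l => if PySem.Str.isIn "check-sat" (String.ofList l) then a ++ ("(check-sat-using " ++ strat ++ ")\n")
                  else a ++ (String.ofList l ++ "\n")) acc
      = acc ++ pvFoldLines strat buf cs := by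
  induction cs with
  | nil =>
    intro buf acc
    have hp : pvLines [] = [[]] := rfl
    rw [hp]
    simp only [List.modifyHead, List.append_nil, List.foldl_cons, List.foldl_nil]
    rw [pv_stepA_eq strat acc buf]
    rfl
  | cons c r ih =>
    intro buf acc
    by_cases hc : c = '\n'
    · subst hc
      have hp : pvLines ('\n' :: r) = [] :: pvLines r := by simp [pvLines]
      rw [hp]
      simp only [List.modifyHead, List.append_nil, List.foldl_cons]
      rw [pv_stepA_eq strat acc buf, ← pvLines_modifyHead_nil (pvLines r),
          ih [] (acc ++ (pvEmitLine strat buf ++ "\n"))]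
      simp [pvFoldLines, String.append_assoc]
    · have hp : pvLines (c :: r) = (pvLines r).modifyHead (c :: ·) := by simp [pvLines, hc]
      rw [hp]
      have hcomp : ((pvLines r).modifyHead (c :: ·)).modifyHead (fun x => buf ++ x)
          = (pvLines r).modifyHead (fun x => (buf ++ [c]) ++ x) := by
        cases pvLines r <;> simp [List.modifyHead]
      rw [hcomp, ih (buf ++ [c]) acc]
      have hf : pvFoldLines strat buf (c :: r) = pvFoldLines strat (buf ++ [c]) r := by
        simp [pvFoldLines, hc]
      rw [hf]

theorem pv_foldB (strat : String) (cs : List Char) : ∀ (out : List String) (buf : List Char),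
    PySem.Str.join ""
        ((cs.foldl
            (fun (st : List String × List Char) ch =>
              if ch = '\n' then (st.1 ++ [pvEmitLine strat st.2] ++ ["\n"], ([] : List Char))
              else (st.1, st.2 ++ [ch])) (out, buf)).1
          ++ [pvEmitLine strat
              ((cs.foldl
                (fun (st : List String × List Char) ch =>
                  if ch = '\n' then (st.1 ++ [pvEmitLine strat st.2] ++ ["\n"], ([] : List Char))
                  else (st.1, st.2 ++ [ch])) (out, buf)).2)]
          ++ ["\n"])
      = PySem.Str.join "" out ++ pvFoldLines strat buf cs := by
  induction cs with
  | nil =>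
    intro out buf
    simp only [List.foldl_nil, pvFoldLines, pv_join_empty]
    simp [String.ofList_append]
  | cons c r ih =>
    intro out buf
    by_cases hc : c = '\n'
    · subst hc
      simp only [List.foldl_cons, reduceIte]
      rw [ih (out ++ [pvEmitLine strat buf] ++ ["\n"]) []]
      have hf : pvFoldLines strat buf ('\n' :: r)
          = pvEmitLine strat buf ++ "\n" ++ pvFoldLines strat [] r := by
        simp [pvFoldLines]
      rw [hf]
      simp only [pv_join_empty]
      simp [String.ofList_append, String.append_assoc]
    · simp only [List.foldl_cons, if_neg hc]
      rw [ih out (buf ++ [c])]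
      have hf : pvFoldLines strat buf (c :: r) = pvFoldLines strat (buf ++ [c]) r := by
        simp [pvFoldLines, hc]
      rw [hf]

-- ===== VERDICT (by name: the statement is the Claim_ definition above) =====
theorem rewrite_smt2_with_strat_spec : Claim_equal_rewrite_smt2_with_strat := by
  intro smt2_str strat _
  unfold Spec_rewrite_smt2_with_strat rewrite_smt2_with_strat
  simp only [rewrite_smt2_with_strat_alt]
  have hsplit : (PySem.Str.split? smt2_str "\n").getD []
      = (pvLines smt2_str.toList).map String.ofList := by
    simp [PySem.Str.split?, PySem.Chars.split?, pv_splitOn_newline]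
  rw [hsplit, List.foldl_map]
  rw [← pvLines_modifyHead_nil (pvLines smt2_str.toList)]
  rw [pv_foldA strat smt2_str.toList [] ""]
  rw [pv_foldB strat smt2_str.toList [] []]
  simp [PySem.Str.join, PySem.Chars.join, List.intercalate]
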